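-- pv_equiv track=rewrite | github.com/Patrik1352/Yandex_algo | 2/B.py | slow_but_work
-- ===== SOURCE A (Python) =====
-- def slow_but_work(N,K,prices):
--     if N == 1:
--         return 0
--     max_stoncs = 0
--     prices = prices+[0]*K
--     for i in range(len(prices)-K):
--         stonc = max(prices[i + 1:i + K + 1]) - prices[i]
--         if stonc > max_stoncs:
--             max_stoncs = stonc
--     return max_stoncs
-- ===== SOURCE B (Python) =====
-- def slow_but_work(N, K, prices):
--     if N == 1:
--         return 0
--     n = len(prices)
--     arr = prices + [0] * K
--     dq = []      # monotonic deque of indices; dq[head:] are the strict prefix maxima of the window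
--     head = 0
--     best = 0
--     for i in range(n - 1, -1, -1):
--         j = i + 1                      # index entering the window (i, i+K]
--         while len(dq) > head and arr[dq[-1]] <= arr[j]:
--             dq.pop()
--         dq.append(j)
--         while dq[head] > i + K:
--             head += 1
--         profit = arr[dq[head]] - arr[i]
--         if profit > best:
--             best = profit
--     return best
-- ===== Notes on version B (the rewrite author's own statement) =====
-- stated objective: faster
-- what changed: Replaces the per-index max() over a fresh K-slice (O(N*K)) by a single right-to-left scan that maintains a monotonic deque of window-maximum candidates, so each index is pushed and popped at most once (O(N)).
import Mathlib
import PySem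

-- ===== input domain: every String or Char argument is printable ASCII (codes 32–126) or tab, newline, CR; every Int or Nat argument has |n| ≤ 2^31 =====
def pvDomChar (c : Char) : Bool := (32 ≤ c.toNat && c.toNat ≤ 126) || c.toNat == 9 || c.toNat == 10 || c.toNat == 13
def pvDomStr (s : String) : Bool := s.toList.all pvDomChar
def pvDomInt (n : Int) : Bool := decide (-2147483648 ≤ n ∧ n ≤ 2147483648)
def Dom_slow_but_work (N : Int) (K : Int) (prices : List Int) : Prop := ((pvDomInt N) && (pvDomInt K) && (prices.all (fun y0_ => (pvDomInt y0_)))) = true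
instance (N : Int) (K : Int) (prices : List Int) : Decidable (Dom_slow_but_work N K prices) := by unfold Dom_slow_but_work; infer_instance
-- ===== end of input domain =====

-- B replaces A's per-index max() over a fresh K-slice (O(N*K)) by one right-to-left scan with a
-- monotonic deque of window-maximum candidates (each index pushed/popped at most once).

-- ===== PORT A =====
-- stonc = max(prices[i + 1:i + K + 1]) - prices[i]   (max() of an empty list raises ValueError: excluded by Pre_)
def pvStonc (pr : List Int) (K : Int) (i : Int) : Int :=
  (PySem.List.max? (PySem.List.slice pr (some (i + 1)) (some (i + K + 1))) (fun y => y)).getD 0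
    - PySem.List.pyGetD pr i 0

def slow_but_work (N : Int) (K : Int) (prices : List Int) : Int :=
  if N = 1 then 0
  else
    -- prices = prices + [0]*K
    let pr := prices ++ PySem.List.pyRepeat [(0 : Int)] K
    -- for i in range(len(prices) - K): …
    (PySem.List.pyRange 0 ((pr.length : Int) - K) 1).foldl
      (fun max_stoncs i =>
        let stonc := pvStonc pr K i
        if stonc > max_stoncs then stonc else max_stoncs) 0

-- ===== PORT B =====
-- while len(dq) > head and arr[dq[-1]] <= arr[j]: dq.pop()
-- (the Lean deque `rdq` stores the Python list reversed — newest element first; `act` = len(dq) - head,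
--  the number of still-active entries, which form the FIRST `act` elements of `rdq`)
def pvPop (arr : List Int) (v : Int) : List Int → Nat → List Int × Nat
  | dq, 0 => (dq, 0)
  | [], act => ([], act)
  | m :: rest, act + 1 =>
    if PySem.List.pyGetD arr m 0 ≤ v then pvPop arr v rest act
    else (m :: rest, act + 1)

-- while dq[head] > i + K: head += 1   (dq[head] = rdq[act-1]; act = 0 would be Python's IndexError,
-- unreachable because the just-pushed index is never evicted)
def pvEvict (rdq : List Int) (bound : Int) : Nat → Nat
  | 0 => 0
  | act + 1 => if bound < rdq.getD act 0 then pvEvict rdq bound act else act + 1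

-- one iteration of the scan: pop dominated candidates, push j = i+1, evict indices > i+K, read the max
def pvStep (arr : List Int) (K : Int) (st : List Int × Nat × Int) (i : Int) : List Int × Nat × Int :=
  let j := i + 1
  let pr := pvPop arr (PySem.List.pyGetD arr j 0) st.1 st.2.1
  let rdq := j :: pr.1
  let act := pvEvict rdq (i + K) (pr.2 + 1)
  let profit := PySem.List.pyGetD arr (rdq.getD (act - 1) 0) 0 - PySem.List.pyGetD arr i 0
  (rdq, act, if profit > st.2.2 then profit else st.2.2)

def slow_but_work_alt (N : Int) (K : Int) (prices : List Int) : Int :=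
  if N = 1 then 0
  else
    let n : Int := prices.length
    let arr := prices ++ PySem.List.pyRepeat [(0 : Int)] K
    -- for i in range(n - 1, -1, -1): …
    ((PySem.List.pyRange (n - 1) (-1) (-1)).foldl (pvStep arr K) ([], 0, 0)).2.2

-- ===== PRECONDITION & SPEC =====
-- Pre_ excludes exactly the inputs where A raises: with N ≠ 1 and K ≤ 0 the window slice is empty, so
-- max() raises ValueError (except when prices = [] and K = 0, where the loop body never runs).
def Pre_slow_but_work (N : Int) (K : Int) (prices : List Int) : Prop :=
  N = 1 ∨ 1 ≤ K ∨ (prices = [] ∧ 0 ≤ K)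
instance (N : Int) (K : Int) (prices : List Int) : Decidable (Pre_slow_but_work N K prices) := by
  unfold Pre_slow_but_work; infer_instance

def pvWitness_slow_but_work : Int × Int × List Int := (5, 2, [3, -1, 4, 1])

def Spec_slow_but_work (N : Int) (K : Int) (prices : List Int) (out : Int) : Prop := out = slow_but_work_alt N K prices
instance (N : Int) (K : Int) (prices : List Int) (out : Int) : Decidable (Spec_slow_but_work N K prices out) := by unfold Spec_slow_but_work; infer_instance

-- ===== CLAIM (what is proved, stated in full; the proofs are below) =====
def Claim_equal_slow_but_work : Prop := ∀ (N : Int) (K : Int) (prices : List Int), Dom_slow_but_work N K prices → Pre_slow_but_work N K prices → Spec_slow_but_work N K prices (slow_but_work N K prices)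

-- ===== LEMMAS AND PROOFS =====

-- arr[m] as a total function (all accesses are in range on the admitted inputs)
def pvG (arr : List Int) (m : Int) : Int := PySem.List.pyGetD arr m 0

-- canonical active deque: the strict prefix maxima of the window [lo, lo+len), newest (= smallest) first
def pvCand (g : Int → Int) : Int → Nat → List Int
  | _, 0 => []
  | lo, len + 1 => lo :: (pvCand g (lo + 1) len).dropWhile (fun m => g m ≤ g lo)

-- window size of the step whose window starts at lo = i+1 (n = number of real prices)
def pvW (K nn lo : Int) : Nat := min K.toNat (nn - lo + 1).toNat

lemma pvCand_mem (g : Int → Int) (lo : Int) (len : Nat) (m : Int)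
    (h : m ∈ pvCand g lo len) : lo ≤ m ∧ m < lo + len := by
  induction len generalizing lo with
  | zero => simp [pvCand] at h
  | succ k ih =>
    simp only [pvCand, List.mem_cons] at h
    rcases h with rfl | h
    · omega
    · have := ih (lo + 1) ((List.dropWhile_sublist _).mem h)
      push_cast at this ⊢
      omega

lemma pv_head_dropWhile (p : Int → Bool) (l : List Int) (x : Int) (xs : List Int)
    (h : l.dropWhile p = x :: xs) : p x = false := by
  induction l with
  | nil => simp [List.dropWhile] at h
  | cons a t ih =>
    rw [List.dropWhile_cons] at h
    by_cases hp : p a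
    · exact ih (by simpa [hp] using h)
    · simp only [hp] at h
      cases h
      simpa using hp

-- the last active element is the (first occurrence of the) maximum of the window
lemma pvCand_last (g : Int → Int) (lo : Int) (len : Nat) :
    ∃ L, (pvCand g lo (len + 1)).getLast? = some L ∧ lo ≤ L ∧ L < lo + (len + 1 : Nat) ∧
      ∀ m : Int, lo ≤ m → m < lo + (len + 1 : Nat) → g m ≤ g L := by
  induction len generalizing lo with
  | zero =>
    refine ⟨lo, by simp [pvCand], le_refl _, by push_cast; omega, ?_⟩
    intro m h1 h2
    have : m = lo := by push_cast at h2; omega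
    simp [this]
  | succ k ih =>
    obtain ⟨L, hL, hb1, hb2, hmax⟩ := ih (lo + 1)
    have hLmem : L ∈ pvCand g (lo + 1) (k + 1) := List.mem_of_getLast? hL
    by_cases hd : (pvCand g (lo + 1) (k + 1)).dropWhile (fun m => g m ≤ g lo) = []
    · have hall : ∀ x ∈ pvCand g (lo + 1) (k + 1), g x ≤ g lo := by
        intro x hx
        have := (List.dropWhile_eq_nil_iff).mp hd x hx
        simpa using this
      refine ⟨lo, ?_, le_refl _, by push_cast; omega, ?_⟩
      · rw [show pvCand g lo (k + 1 + 1)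
              = lo :: (pvCand g (lo + 1) (k + 1)).dropWhile (fun m => g m ≤ g lo) from rfl, hd]
        simp
      intro m h1 h2
      rcases eq_or_lt_of_le h1 with rfl | h1'
      · exact le_refl _
      · have h3 : g m ≤ g L := hmax m (by omega) (by push_cast at h2 ⊢; omega)
        have h4 : g L ≤ g lo := hall L hLmem
        omega
    · obtain ⟨x, xs, hxs⟩ := List.exists_cons_of_ne_nil hd
    -- the head of the surviving suffix strictly dominates g lo
      have hx_not : ¬ (g x ≤ g lo) :=
        of_decide_eq_false (by simpa using pv_head_dropWhile _ _ _ _ hxs)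
      have hx_mem : x ∈ pvCand g (lo + 1) (k + 1) :=
        (List.dropWhile_sublist _).mem (by rw [hxs]; simp)
      have hx_b := pvCand_mem g (lo + 1) (k + 1) x hx_mem
      refine ⟨L, ?_, by omega, by push_cast at hb2 ⊢; omega, ?_⟩
      · show (lo :: (pvCand g (lo + 1) (k + 1)).dropWhile (fun m => g m ≤ g lo)).getLast? = some L
        rw [show (lo :: (pvCand g (lo + 1) (k + 1)).dropWhile (fun m => g m ≤ g lo))
              = [lo] ++ (pvCand g (lo + 1) (k + 1)).dropWhile (fun m => g m ≤ g lo) from rfl,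
            List.getLast?_append_of_ne_nil _ hd, ← hL]
        conv_rhs => rw [← List.takeWhile_append_dropWhile (p := fun m => g m ≤ g lo)
          (l := pvCand g (lo + 1) (k + 1))]
        rw [List.getLast?_append_of_ne_nil _ hd]
      · intro m h1 h2
        rcases eq_or_lt_of_le h1 with rfl | h1'
        · have h3 : g x ≤ g L := hmax x hx_b.1 (by push_cast at hx_b ⊢; omega)
          omega
        · exact hmax m (by omega) (by push_cast at h2 ⊢; omega)

-- dropping the last window slot only drops (at most) the element lo+len from the end of the deque
lemma pvCand_snoc (g : Int → Int) (lo : Int) (len : Nat) :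
    pvCand g lo (len + 1) = pvCand g lo len ∨
    pvCand g lo (len + 1) = pvCand g lo len ++ [lo + len] := by
  have unf : ∀ (lo' : Int) (j : Nat),
      pvCand g lo' (j + 1) = lo' :: (pvCand g (lo' + 1) j).dropWhile (fun m => g m ≤ g lo') :=
    fun _ _ => rfl
  induction len generalizing lo with
  | zero => right; simp [pvCand]
  | succ k ih =>
    rcases ih (lo + 1) with h | h
    · left; rw [unf lo (k + 1), h, ← unf lo k]
    · rw [unf lo (k + 1), h, List.dropWhile_append]
      by_cases hemp : ((pvCand g (lo + 1) k).dropWhile (fun m => g m ≤ g lo)).isEmpty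
      · have hnil : (pvCand g (lo + 1) k).dropWhile (fun m => g m ≤ g lo) = [] := by
          simpa [List.isEmpty_iff] using hemp
        simp only [hemp, if_true]
        by_cases hpe : g (lo + 1 + (k : Int)) ≤ g lo
        · left; rw [unf lo k, hnil]; simp [List.dropWhile, hpe]
        · right; rw [unf lo k, hnil]
          simp only [List.dropWhile, decide_eq_false hpe]
          simp
          ring
      · simp only [Bool.not_eq_true, List.isEmpty_eq_false_iff] at hemp
        right
        rw [unf lo k, if_neg (by simpa [List.isEmpty_iff] using hemp)]
        simp
        ring

lemma pvPop_spec (arr : List Int) (w : Int) (c junk : List Int) :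
    pvPop arr (PySem.List.pyGetD arr w 0) (c ++ junk) c.length =
      ((c.dropWhile (fun m => pvG arr m ≤ pvG arr w)) ++ junk,
       (c.dropWhile (fun m => pvG arr m ≤ pvG arr w)).length) := by
  induction c with
  | nil => simp [pvPop, List.dropWhile]
  | cons x t ih =>
    by_cases h : PySem.List.pyGetD arr x 0 ≤ PySem.List.pyGetD arr w 0
    · simpa [pvPop, List.dropWhile, pvG, h] using ih
    · simp [pvPop, List.dropWhile, pvG, h]

-- the eviction loop stops immediately when the deque's oldest active index is within the window
lemma pvEvict_stay (c junk : List Int) (bound : Int) (hne : c ≠ [])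
    (hlast : c.getLast hne ≤ bound) : pvEvict (c ++ junk) bound c.length = c.length := by
  obtain ⟨m, hm⟩ : ∃ m, c.length = m + 1 :=
    ⟨c.length - 1, by have := List.length_pos_iff.mpr hne; omega⟩
  have hg : (c ++ junk).getD m 0 = c.getLast hne := by
    rw [List.getD_eq_getElem (c ++ junk) 0 (by simp; omega),
        List.getElem_append_left (by omega), List.getLast_eq_getElem]
    congr 1
    omega
  rw [hm]
  show pvEvict (c ++ junk) bound (m + 1) = m + 1
  rw [pvEvict, hg, if_neg (by omega)]

-- …and removes exactly the (single) out-of-window index at the old end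
lemma pvEvict_drop (c junk : List Int) (e bound : Int) (hne : c ≠ [])
    (hlast : c.getLast hne ≤ bound) (he : bound < e) :
    pvEvict ((c ++ [e]) ++ junk) bound (c.length + 1) = c.length := by
  have hg : ((c ++ [e]) ++ junk).getD c.length 0 = e := by
    rw [List.getD_eq_getElem ((c ++ [e]) ++ junk) 0 (by simp),
        List.getElem_append_left (by simp)]
    simp
  rw [pvEvict, hg, if_pos he, List.append_assoc]
  exact pvEvict_stay c ([e] ++ junk) bound hne hlast

-- the value A computes at index i equals the value at the last active deque element
lemma pvStonc_eq (arr : List Int) (nn K : Int) (hK : 1 ≤ K) (hlen : (arr.length : Int) = nn + K)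
    (hpad : ∀ m : Int, nn ≤ m → m < (arr.length : Int) → pvG arr m = 0)
    (i : Int) (h0 : 0 ≤ i) (hi : i < nn) (L : Int)
    (hL : (pvCand (pvG arr) (i + 1) (pvW K nn (i + 1))).getLast? = some L) :
    pvStonc arr K i = pvG arr L - pvG arr i := by
  have hnn : 1 ≤ nn := by omega
  have hlenN : (arr.length : Int) = nn + K := hlen
  set t := K.toNat with ht
  set a := (i + 1).toNat with ha
  have hai : (a : Int) = i + 1 := Int.toNat_of_nonneg (by omega)
  have hti : (t : Int) = K := Int.toNat_of_nonneg (by omega)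
  have hWmin : pvW K nn (i + 1) = min t ((nn - i).toNat) := by
    unfold pvW; congr 2; ring
  set W := pvW K nn (i + 1) with hWdef
  have hWt : W ≤ t := by omega
  have hW1 : 1 ≤ W := by omega
  obtain ⟨W', hW'⟩ : ∃ W', W = W' + 1 := ⟨W - 1, by omega⟩
  obtain ⟨L', hL', hLb1, hLb2, hLmax⟩ := pvCand_last (pvG arr) (i + 1) W'
  rw [← hW'] at hL' hLb2 hLmax
  have hLL : L' = L := by rw [hL'] at hL; exact Option.some_inj.mp hL
  rw [hLL] at hLb1 hLb2 hLmax
  have hGet : ∀ (m : Nat), m < arr.length → pvG arr (m : Int) = arr.getD m 0 := by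
    intro m _; rw [pvG, PySem.List.pyGetD_natCast]
  have hs : PySem.List.slice arr (some (i + 1)) (some (i + K + 1)) = (arr.drop a).take t := by
    rw [PySem.List.slice_toNat arr (show (0:Int) ≤ i + 1 by omega) (show (0:Int) ≤ i + K + 1 by omega)]
    congr 1
    omega
  set s := (arr.drop a).take t with hsdef
  have hslen : s.length = t := by
    simp only [hsdef, List.length_take, List.length_drop]
    omega
  have hsne : s ≠ [] := by
    intro h; rw [h] at hslen; simp at hslen; omega
  have hsget : ∀ (k : Nat) (hk : k < t), s.getD k 0 = arr.getD (a + k) 0 := by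
    intro k hk
    rw [List.getD_eq_getElem s 0 (by omega), List.getD_eq_getElem arr 0 (by omega)]
    simp [hsdef]
  cases hM : PySem.List.max? s (fun y => y) with
  | none => exact absurd ((PySem.List.max?_eq_none_iff s (fun y => y)).mp hM) hsne
  | some M =>
    have hMmem := PySem.List.max?_mem hM
    have hMmax := PySem.List.max?_isMax hM
    obtain ⟨k, hk, hMk⟩ := List.mem_iff_getElem.mp hMmem
    have hk' : k < t := by omega
    have hMk' : M = pvG arr ((a : Int) + k) := by
      rw [show ((a : Int) + k) = ((a + k : Nat) : Int) by push_cast; ring,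
          hGet (a + k) (by omega), ← hsget k hk', List.getD_eq_getElem s 0 (by omega), hMk]
    have key1 : M ≤ pvG arr L := by
      by_cases hcase : (a : Int) + k < i + 1 + W
      · rw [hMk']; exact hLmax _ (by omega) (by omega)
      · have hWnn : (W : Int) = nn - i := by omega
        have hm0 : pvG arr ((a : Int) + k) = 0 := hpad _ (by omega) (by omega)
        have hn0 : pvG arr nn = 0 := hpad nn (le_refl _) (by omega)
        have hle : pvG arr nn ≤ pvG arr L := hLmax nn (by omega) (by omega)
        omega
    have key2 : pvG arr L ≤ M := by
      set kL := (L - (i + 1)).toNat with hkL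
      have hkLt : kL < t := by omega
      have hLs : pvG arr L = s.getD kL 0 := by
        rw [show L = ((a + kL : Nat) : Int) by push_cast; omega, hGet (a + kL) (by omega),
            hsget kL hkLt]
      have hmem : s.getD kL 0 ∈ s := by
        rw [List.getD_eq_getElem s 0 (by omega)]
        exact List.getElem_mem _
      have := hMmax _ hmem
      simpa [hLs] using this
    have hML : M = pvG arr L := le_antisymm key1 key2
    rw [pvStonc, hs, hM, hML]
    simp [pvG]

-- one iteration of B's loop, on a state whose active prefix is the canonical deque
lemma pvStep_spec (arr : List Int) (nn K : Int) (hK : 1 ≤ K) (hlen : (arr.length : Int) = nn + K)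
    (hpad : ∀ m : Int, nn ≤ m → m < (arr.length : Int) → pvG arr m = 0)
    (i : Int) (h0 : 0 ≤ i) (hi : i < nn) (junk : List Int) (best : Int) :
    ∃ junk', pvStep arr K (pvCand (pvG arr) (i + 2) (pvW K nn (i + 2)) ++ junk,
        (pvCand (pvG arr) (i + 2) (pvW K nn (i + 2))).length, best) i =
      (pvCand (pvG arr) (i + 1) (pvW K nn (i + 1)) ++ junk',
       (pvCand (pvG arr) (i + 1) (pvW K nn (i + 1))).length,
       if pvStonc arr K i > best then pvStonc arr K i else best) := by
  have hWp' : pvW K nn (i + 2) = min K.toNat (nn - i - 1).toNat := by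
    unfold pvW; congr 2; ring
  have hWc' : pvW K nn (i + 1) = min K.toNat (nn - i).toNat := by
    unfold pvW; congr 2; ring
  set Wp := pvW K nn (i + 2) with hWpd
  set Wc := pvW K nn (i + 1) with hWcd
  have hKt : 1 ≤ K.toNat := by omega
  have hWc1 : 1 ≤ Wc := by omega
  have hWcK : (Wc : Int) ≤ K := by omega
  -- the canonical deque after push
  have hcons : pvCand (pvG arr) (i + 1) (Wp + 1)
      = (i + 1) :: (pvCand (pvG arr) (i + 2) Wp).dropWhile
          (fun m => pvG arr m ≤ pvG arr (i + 1)) := by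
    have h : pvCand (pvG arr) (i + 1) (Wp + 1)
        = (i + 1) :: (pvCand (pvG arr) (i + 1 + 1) Wp).dropWhile
            (fun m => pvG arr m ≤ pvG arr (i + 1)) := rfl
    rw [h, show (i : Int) + 1 + 1 = i + 2 by ring]
  -- the last active element, bounded by i + K
  obtain ⟨Wc', hWc''⟩ : ∃ w, Wc = w + 1 := ⟨Wc - 1, by omega⟩
  obtain ⟨L, hL, hLb1, hLb2, _⟩ := pvCand_last (pvG arr) (i + 1) Wc'
  rw [← hWc''] at hL hLb2
  have hne : pvCand (pvG arr) (i + 1) Wc ≠ [] := by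
    intro h; rw [h] at hL; simp at hL
  have hlastL : (pvCand (pvG arr) (i + 1) Wc).getLast hne = L := by
    have := List.getLast?_eq_some_getLast hne
    rw [this] at hL; exact Option.some_inj.mp hL
  have hlast_le : (pvCand (pvG arr) (i + 1) Wc).getLast hne ≤ i + K := by
    rw [hlastL]; omega
  -- eviction returns the canonical deque of the new window
  obtain ⟨junk', hjq, hev⟩ : ∃ junk',
      pvCand (pvG arr) (i + 1) (Wp + 1) ++ junk = pvCand (pvG arr) (i + 1) Wc ++ junk' ∧
      pvEvict (pvCand (pvG arr) (i + 1) (Wp + 1) ++ junk) (i + K)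
          ((pvCand (pvG arr) (i + 1) (Wp + 1)).length)
        = (pvCand (pvG arr) (i + 1) Wc).length := by
    have hsplit : Wp + 1 = Wc ∨ (Wp = Wc ∧ Wc = K.toNat) := by omega
    rcases hsplit with h | ⟨h, hWcKt⟩
    · refine ⟨junk, by rw [h], ?_⟩
      rw [h]
      exact pvEvict_stay _ junk _ hne hlast_le
    · rcases pvCand_snoc (pvG arr) (i + 1) Wc with hsn | hsn
      · rw [show Wp + 1 = Wc + 1 by omega, hsn]
        exact ⟨junk, rfl, pvEvict_stay _ junk _ hne hlast_le⟩
      · rw [show Wp + 1 = Wc + 1 by omega, hsn]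
        refine ⟨[i + 1 + (Wc : Int)] ++ junk, by simp, ?_⟩
        rw [List.length_append, List.length_singleton]
        exact pvEvict_drop _ junk _ _ hne hlast_le (by omega)
  -- the profit read off the deque is A's stonc
  have hread : (pvCand (pvG arr) (i + 1) Wc ++ junk').getD
      ((pvCand (pvG arr) (i + 1) Wc).length - 1) 0 = L := by
    have hlp : 0 < (pvCand (pvG arr) (i + 1) Wc).length := List.length_pos_iff.mpr hne
    rw [List.getD_eq_getElem _ 0 (by simp; omega), List.getElem_append_left (by omega)]
    rw [← hlastL, List.getLast_eq_getElem]
  have hstonc : pvStonc arr K i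
      = PySem.List.pyGetD arr L 0 - PySem.List.pyGetD arr i 0 :=
    pvStonc_eq arr nn K hK hlen hpad i h0 hi L hL
  -- assemble one iteration
  refine ⟨junk', ?_⟩
  show pvStep arr K (pvCand (pvG arr) (i + 2) Wp ++ junk,
      (pvCand (pvG arr) (i + 2) Wp).length, best) i = _
  simp only [pvStep]
  rw [show PySem.List.pyGetD arr (i + 1) 0 = PySem.List.pyGetD arr (i + 1) 0 from rfl]
  rw [pvPop_spec arr (i + 1) (pvCand (pvG arr) (i + 2) Wp) junk]
  rw [show ((i : Int) + 1) :: ((pvCand (pvG arr) (i + 2) Wp).dropWhile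
        (fun m => pvG arr m ≤ pvG arr (i + 1)) ++ junk)
      = pvCand (pvG arr) (i + 1) (Wp + 1) ++ junk by rw [hcons, List.cons_append]]
  rw [show ((pvCand (pvG arr) (i + 2) Wp).dropWhile
        (fun m => pvG arr m ≤ pvG arr (i + 1))).length + 1
      = (pvCand (pvG arr) (i + 1) (Wp + 1)).length by rw [hcons, List.length_cons]]
  rw [hev, hjq, hread, hstonc]

-- B's scan computes the same running maximum as A's per-index loop, in reverse order
lemma pvLoop (arr : List Int) (nn K : Int) (hK : 1 ≤ K) (hlen : (arr.length : Int) = nn + K)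
    (hpad : ∀ m : Int, nn ≤ m → m < (arr.length : Int) → pvG arr m = 0) :
    ∀ t : Nat, ∀ i : Int, (i + 1).toNat = t → -1 ≤ i → i < nn → ∀ junk best,
    ((PySem.List.pyRange i (-1) (-1)).foldl (pvStep arr K)
        (pvCand (pvG arr) (i + 2) (pvW K nn (i + 2)) ++ junk,
         (pvCand (pvG arr) (i + 2) (pvW K nn (i + 2))).length, best)).2.2
      = (PySem.List.pyRange i (-1) (-1)).foldl
          (fun b x => if pvStonc arr K x > b then pvStonc arr K x else b) best := by
  intro t
  induction t with
  | zero =>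
    intro i hti h1 h2 junk best
    have : i = -1 := by omega
    subst this
    rw [PySem.List.pyRange_neg_one_eq_nil (by omega)]
    simp
  | succ t ih =>
    intro i hti h1 h2 junk best
    have h0 : 0 ≤ i := by omega
    rw [PySem.List.pyRange_neg_one_cons (by omega : (-1 : Int) < i)]
    simp only [List.foldl_cons]
    obtain ⟨junk', hstep⟩ := pvStep_spec arr nn K hK hlen hpad i h0 h2 junk best
    rw [hstep]
    have hrec := ih (i - 1) (by omega) (by omega) (by omega) junk'
      (if pvStonc arr K i > best then pvStonc arr K i else best)
    rw [show (i - 1) + 2 = i + 1 by ring] at hrec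
    exact hrec

-- a running maximum does not depend on the traversal order
lemma pvFold_reverse (f : Int → Int) (l : List Int) (b : Int) :
    l.reverse.foldl (fun m i => if f i > m then f i else m) b
      = l.foldl (fun m i => if f i > m then f i else m) b := by
  have hf : (fun (m i : Int) => if f i > m then f i else m) = fun m i => max m (f i) := by
    funext m x
    by_cases h : f x > m
    · rw [if_pos h, max_eq_right (by omega)]
    · rw [if_neg h, max_eq_left (by omega)]
  rw [hf]
  have aux : ∀ (l : List Int) (b c : Int),
      l.foldl (fun m i => max m (f i)) (max b c) = max (l.foldl (fun m i => max m (f i)) b) c := by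
    intro l
    induction l with
    | nil => simp
    | cons x xs ih =>
      intro b c
      simp only [List.foldl_cons]
      rw [show max (max b c) (f x) = max (max b (f x)) c from max_right_comm b c (f x), ih]
  induction l with
  | nil => simp
  | cons x xs ih =>
    simp only [List.reverse_cons, List.foldl_append, List.foldl_cons, List.foldl_nil, ih]
    rw [aux]

-- ===== VERDICT (by name: the statement is the Claim_ definition above) =====
theorem slow_but_work_spec : Claim_equal_slow_but_work := by
  intro N K prices _ hpre
  unfold Spec_slow_but_work
  by_cases hN : N = 1
  · simp [slow_but_work, slow_but_work_alt, hN]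
  · unfold Pre_slow_but_work at hpre
    by_cases hK : 1 ≤ K
    · -- the main case: a genuine scan
      set nn : Int := (prices.length : Int) with hnn
      set arr := prices ++ PySem.List.pyRepeat [(0 : Int)] K with harr
      have hrep : PySem.List.pyRepeat [(0 : Int)] K = List.replicate K.toNat 0 :=
        PySem.List.pyRepeat_singleton 0 K
      have hlen : (arr.length : Int) = nn + K := by
        rw [harr, hrep]; simp; omega
      have hpad : ∀ m : Int, nn ≤ m → m < (arr.length : Int) → pvG arr m = 0 := by
        intro m hm1 hm2
        have h0m : 0 ≤ m := by omega
        have e1 : pvG arr m = arr.getD m.toNat 0 := by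
          rw [pvG, PySem.List.pyGetD_eq_getElem arr 0 h0m hm2, List.getD_eq_getElem arr 0 (by omega)]
        rw [e1, harr, hrep, List.getD_append_right prices _ 0 m.toNat (by omega),
            List.getD_eq_getElem _ 0 (by simp; omega), List.getElem_replicate]
      have hloop := pvLoop arr nn K hK hlen hpad nn.toNat (nn - 1) (by omega) (by omega)
        (by omega) [] 0
      rw [show (nn - 1) + 2 = nn + 1 by ring] at hloop
      have hW0 : pvW K nn (nn + 1) = 0 := by
        unfold pvW; rw [show nn - (nn + 1) + 1 = 0 by ring]; simp
      rw [hW0] at hloop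
      simp only [pvCand, List.nil_append, List.length_nil] at hloop
      simp only [slow_but_work, slow_but_work_alt, hN, if_false]
      rw [← harr, ← hnn, hloop]
      rw [show ((arr.length : Int)) - K = nn by omega]
      rw [PySem.List.pyRange_neg_one_eq_reverse, show (-1 : Int) + 1 = 0 by ring,
          show nn - 1 + 1 = nn by ring]
      exact (pvFold_reverse (pvStonc arr K) (PySem.List.pyRange 0 nn 1) 0).symm
    · -- prices = [] and K = 0: both loops are empty
      have hp : prices = [] := by tauto
      have hK0 : K = 0 := by rcases hpre with h | h | h <;> omega
      subst hp hK0
      simp [slow_but_work, slow_but_work_alt, PySem.List.pyRepeat_singleton,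
        PySem.List.pyRange_one_eq_nil, PySem.List.pyRange_neg_one_eq_nil]
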